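-- pv_equiv track=rewrite | github.com/masa-source/citadel-review-snapshot-2026-03-22 | apps/backend/utils/excel_to_text.py | _trim_empty_rows_and_columns
-- ===== SOURCE A (Python) =====
-- def _is_empty_cell(value: object) -> bool:
--     """セルが空か（None / 空文字 / 空白のみ）。"""
--     if value is None:
--         return True
--     s = str(value).strip()
--     return s == ""
--
-- def _trim_empty_rows_and_columns(data: list[list[object]]) -> list[list[object]]:
--     """すべてのセルが空の行・列を除外する。"""
--     if not data:
--         return []
--     # 空でない行のみ残す
--     non_empty_rows = [row for row in data if not all(_is_empty_cell(c) for c in row)]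
--     if not non_empty_rows:
--         return []
--     max_cols = max(len(row) for row in non_empty_rows)
--     # 列インデックスごとに「その列がすべて空か」を判定
--     non_empty_col_indices = [
--         ci
--         for ci in range(max_cols)
--         if not all(
--             _is_empty_cell(row[ci]) if ci < len(row) else True for row in non_empty_rows
--         )
--     ]
--     return [
--         [row[ci] for ci in non_empty_col_indices if ci < len(row)]
--         for row in non_empty_rows
--     ]
-- ===== SOURCE B (Python) =====
-- def _trim_empty_rows_and_columns(data: list[list[object]]) -> list[list[object]]:
--     """Single pass: keep non-empty rows and merge a per-column 'has content' mask."""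
--     mask = []
--     kept = []
--     for row in data:
--         flags = [not (c is None or str(c).strip() == "") for c in row]
--         mask = [
--             (mask[i] if i < len(mask) else False)
--             or (flags[i] if i < len(flags) else False)
--             for i in range(max(len(mask), len(flags)))
--         ]
--         if any(flags):
--             kept.append(row)
--     if not kept:
--         return []
--     cols = [ci for ci in range(len(mask)) if mask[ci]]
--     return [[row[ci] for ci in cols if ci < len(row)] for row in kept]
-- ===== Notes on version B (the rewrite author's own statement) =====
-- stated objective: alternative
-- what changed: Replaces A's three separate phases (row filter, per-column rescan of all surviving rows, rebuild) by one pass over the rows that simultaneously keeps non-empty rows and merges a boolean per-column 'has content' mask, from which the kept column indices are read off directly.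
import Mathlib
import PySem

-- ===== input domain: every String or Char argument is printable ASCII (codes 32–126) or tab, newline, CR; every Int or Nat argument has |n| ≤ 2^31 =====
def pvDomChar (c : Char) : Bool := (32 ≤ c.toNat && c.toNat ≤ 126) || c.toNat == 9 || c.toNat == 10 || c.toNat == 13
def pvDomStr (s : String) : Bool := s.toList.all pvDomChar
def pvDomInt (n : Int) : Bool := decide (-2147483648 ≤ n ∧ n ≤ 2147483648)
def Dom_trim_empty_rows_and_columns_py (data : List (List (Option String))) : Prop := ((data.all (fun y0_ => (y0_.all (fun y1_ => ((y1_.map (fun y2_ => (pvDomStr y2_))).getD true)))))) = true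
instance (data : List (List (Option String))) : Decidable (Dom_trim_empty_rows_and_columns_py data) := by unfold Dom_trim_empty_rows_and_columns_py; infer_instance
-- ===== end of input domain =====

-- B replaces A's separate row-filter and per-column rescan phases by a single pass that
-- merges a per-column boolean mask; same values, similar cost (objective: alternative).

-- ===== PORT A =====
-- _is_empty_cell: None, or str(value).strip() == ""
def isEmptyCell_py (v : Option String) : Bool :=
  match v with
  | none => true
  | some s => PySem.Str.strip s == ""

-- literal port of A; Python's max over the non-empty list of (Nat) lengths is
-- transliterated as a foldl max with seed 0, exact since lengths are ≥ 0.
def trim_empty_rows_and_columns_py (data : List (List (Option String))) : List (List (Option String)) :=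
  if data.isEmpty then []
  else
    let nonEmptyRows := data.filter (fun row => !(row.all isEmptyCell_py))
    if nonEmptyRows.isEmpty then []
    else
      let maxCols := (nonEmptyRows.map List.length).foldl Nat.max 0
      let nonEmptyColIndices := (List.range maxCols).filter (fun ci =>
        !(nonEmptyRows.all (fun row =>
          if ci < row.length then isEmptyCell_py (row.getD ci none) else true)))
      nonEmptyRows.map (fun row =>
        (nonEmptyColIndices.filter (fun ci => ci < row.length)).map (fun ci => row.getD ci none))

-- ===== PORT B =====
-- B's inline test: not (c is None or str(c).strip() == "")
def cellNonempty_py (c : Option String) : Bool :=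
  match c with
  | none => false
  | some s => !(PySem.Str.strip s == "")

-- B's mask merge comprehension over range(max(len(mask), len(flags)))
def mergeMask_py (mask flags : List Bool) : List Bool :=
  (List.range (max mask.length flags.length)).map
    (fun i => mask.getD i false || flags.getD i false)

def trim_empty_rows_and_columns_py_alt (data : List (List (Option String))) : List (List (Option String)) :=
  let st := data.foldl
    (fun (acc : List (List (Option String)) × List Bool) row =>
      let flags := row.map cellNonempty_py
      (if flags.any id then acc.1 ++ [row] else acc.1, mergeMask_py acc.2 flags))
    ([], [])
  if st.1.isEmpty then []
  else
    let cols := (List.range st.2.length).filter (fun ci => st.2.getD ci false)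
    st.1.map (fun row =>
      (cols.filter (fun ci => ci < row.length)).map (fun ci => row.getD ci none))

-- ===== PRECONDITION & SPEC =====
def Spec_trim_empty_rows_and_columns_py (data : List (List (Option String))) (out : List (List (Option String))) : Prop := out = trim_empty_rows_and_columns_py_alt data
instance (data : List (List (Option String))) (out : List (List (Option String))) : Decidable (Spec_trim_empty_rows_and_columns_py data out) := by unfold Spec_trim_empty_rows_and_columns_py; infer_instance

-- ===== CLAIM (what is proved, stated in full; the proofs are below) =====
def Claim_equal_trim_empty_rows_and_columns_py : Prop := ∀ (data : List (List (Option String))), Dom_trim_empty_rows_and_columns_py data → Spec_trim_empty_rows_and_columns_py data (trim_empty_rows_and_columns_py data)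

-- ===== LEMMAS AND PROOFS =====

theorem cellNonempty_eq_not_empty (c : Option String) :
    cellNonempty_py c = !(isEmptyCell_py c) := by
  cases c <;> simp [cellNonempty_py, isEmptyCell_py]

-- a fold whose two components update independently splits into two folds
theorem foldl_prod_split {α β γ : Type} (g : α → γ → α) (h : β → γ → β)
    (l : List γ) (a : α) (b : β) :
    l.foldl (fun p x => (g p.1 x, h p.2 x)) (a, b) = (l.foldl g a, l.foldl h b) := by
  induction l generalizing a b with
  | nil => rfl
  | cons x t ih => simpa using ih (g a x) (h b x)

theorem foldl_keep_eq_filter {α : Type} (p : α → Bool) (l : List α) (acc : List α) :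
    l.foldl (fun a x => if p x then a ++ [x] else a) acc = acc ++ l.filter p := by
  induction l generalizing acc with
  | nil => simp
  | cons x t ih =>
    by_cases hx : p x = true
    · simp [hx, ih]
    · simp [List.foldl_cons, hx, ih]

theorem mergeMask_getD (a b : List Bool) (i : Nat) :
    (mergeMask_py a b).getD i false = (a.getD i false || b.getD i false) := by
  by_cases h : i < max a.length b.length
  · simp [mergeMask_py, List.getD_eq_getElem?_getD, h]
  · have ha : a.length ≤ i := by omega
    have hb : b.length ≤ i := by omega
    simp [mergeMask_py, List.getD_eq_getElem?_getD, h,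
      List.getElem?_eq_none ha, List.getElem?_eq_none hb]

theorem flags_getD (row : List (Option String)) (i : Nat) :
    (row.map cellNonempty_py).getD i false = cellNonempty_py (row.getD i none) := by
  by_cases h : i < row.length
  · simp [List.getD_eq_getElem?_getD, List.getElem?_eq_getElem h]
  · have h' : row.length ≤ i := by omega
    simp [List.getD_eq_getElem?_getD, h', cellNonempty_py]

theorem mask_fold_getD (data : List (List (Option String))) (m : List Bool) (i : Nat) :
    (data.foldl (fun b row => mergeMask_py b (row.map cellNonempty_py)) m).getD i false
      = (m.getD i false || data.any (fun row => cellNonempty_py (row.getD i none))) := by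
  induction data generalizing m with
  | nil => simp
  | cons row t ih =>
    rw [List.foldl_cons, ih, mergeMask_getD, flags_getD, List.any_cons, Bool.or_assoc]

theorem any_filter_of_imp {α : Type} (p q : α → Bool) (l : List α)
    (h : ∀ x, q x = true → p x = true) :
    (l.filter p).any q = l.any q := by
  induction l with
  | nil => rfl
  | cons x t ih =>
    by_cases hx : p x = true
    · simp [hx, ih]
    · have hqx : q x = false := by
        cases hq : q x
        · rfl
        · exact absurd (h x hq) hx
      simp [hx, hqx, ih]

theorem filter_range_of_false (p : Nat → Bool) (n m : Nat) (hnm : n ≤ m)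
    (h : ∀ i, n ≤ i → p i = false) :
    (List.range m).filter p = (List.range n).filter p := by
  induction m, hnm using Nat.le_induction with
  | base => rfl
  | succ m hm ih =>
    simp [List.range_succ, List.filter_append, h m hm, ih]

theorem foldl_max_init_le (l : List Nat) (a b : Nat) (h : b ≤ a) :
    b ≤ l.foldl Nat.max a := by
  induction l generalizing a with
  | nil => simpa using h
  | cons x t ih => exact ih (Nat.max a x) (le_trans h (Nat.le_max_left _ _))

theorem le_foldl_max (l : List Nat) (a x : Nat) (hx : x ∈ l) :
    x ≤ l.foldl Nat.max a := by
  induction l generalizing a with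
  | nil => cases hx
  | cons y t ih =>
    rcases List.mem_cons.mp hx with rfl | hx'
    · exact foldl_max_init_le t (Nat.max a x) x (Nat.le_max_right _ _)
    · exact ih (Nat.max a y) hx'

-- both cell tests agree pointwise on the (possibly defaulted) cell at index ci
theorem colbody_eq (row : List (Option String)) (ci : Nat) :
    (!(if ci < row.length then isEmptyCell_py (row.getD ci none) else true))
      = cellNonempty_py (row.getD ci none) := by
  by_cases h : ci < row.length
  · simp [h, cellNonempty_eq_not_empty]
  · have h' : row.length ≤ ci := by omega
    simp [h, cellNonempty_py]

theorem any_nonempty_eq (l : List (Option String)) :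
    l.any cellNonempty_py = !(l.all isEmptyCell_py) := by
  induction l with
  | nil => rfl
  | cons c t ih => simp [cellNonempty_eq_not_empty, ih, Bool.not_and]

theorem rowpred_eq (row : List (Option String)) :
    ((row.map cellNonempty_py).any id) = !(row.all isEmptyCell_py) := by
  rw [← any_nonempty_eq]
  simp [List.any_map]

-- a cell that is non-empty at some index forces its row to be non-empty
theorem nonempty_cell_imp_row (ci : Nat) (row : List (Option String))
    (hq : cellNonempty_py (row.getD ci none) = true) :
    (!(row.all isEmptyCell_py)) = true := by
  by_cases h : ci < row.length
  · have hmem : row.getD ci none ∈ row := by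
      rw [List.getD_eq_getElem _ _ h]; exact List.getElem_mem _
    rw [cellNonempty_eq_not_empty] at hq
    have hq' : isEmptyCell_py (row.getD ci none) = false := by
      cases hg : isEmptyCell_py (row.getD ci none)
      · rfl
      · rw [hg] at hq; exact absurd hq (by simp)
    cases hall : row.all isEmptyCell_py
    · rfl
    · have h2 := List.all_eq_true.mp hall _ hmem
      rw [hq'] at h2; cases h2
  · rw [List.getD_eq_default _ _ (by omega)] at hq
    simp [cellNonempty_py] at hq

-- ===== VERDICT (by name: the statement is the Claim_ definition above) =====
theorem trim_empty_rows_and_columns_py_spec : Claim_equal_trim_empty_rows_and_columns_py := by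
  intro data _
  unfold Spec_trim_empty_rows_and_columns_py
  unfold trim_empty_rows_and_columns_py trim_empty_rows_and_columns_py_alt
  have hsplit :
      (data.foldl
        (fun (acc : List (List (Option String)) × List Bool) row =>
          let flags := row.map cellNonempty_py
          (if flags.any id then acc.1 ++ [row] else acc.1, mergeMask_py acc.2 flags))
        ([], []))
      = (data.foldl (fun a row => if (row.map cellNonempty_py).any id then a ++ [row] else a) [],
         data.foldl (fun b row => mergeMask_py b (row.map cellNonempty_py)) []) :=
    foldl_prod_split
      (fun a row => if (row.map cellNonempty_py).any id then a ++ [row] else a)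
      (fun b row => mergeMask_py b (row.map cellNonempty_py)) data [] []
  rw [hsplit, foldl_keep_eq_filter, List.nil_append]
  dsimp only
  have hpred : data.filter (fun row => (row.map cellNonempty_py).any id)
      = data.filter (fun row => !(row.all isEmptyCell_py)) := by
    apply List.filter_congr; intro row _; exact rowpred_eq row
  rw [hpred]
  set ner := data.filter (fun row => !(row.all isEmptyCell_py)) with hner
  set M := data.foldl (fun b row => mergeMask_py b (row.map cellNonempty_py)) [] with hM
  by_cases hd : data = []
  · subst hd; simp [hner]
  · have hd' : data.isEmpty = false := by
      cases data with
      | nil => exact absurd rfl hd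
      | cons x t => rfl
    rw [hd']
    simp only [Bool.false_eq_true, if_false]
    by_cases hne : ner.isEmpty
    · rw [if_pos hne, if_pos hne]
    · rw [if_neg (by simp [hne]), if_neg (by simp [hne])]
      set maxCols := (ner.map List.length).foldl Nat.max 0 with hmax
      have hq : ∀ ci : Nat,
          (!(ner.all (fun row =>
              if ci < row.length then isEmptyCell_py (row.getD ci none) else true)))
          = M.getD ci false := by
        intro ci
        rw [hM, mask_fold_getD]
        simp only [List.getD_nil, Bool.false_or]
        rw [← any_filter_of_imp (fun row => !(row.all isEmptyCell_py))
            (fun row => cellNonempty_py (row.getD ci none)) data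
            (fun row hrow => nonempty_cell_imp_row ci row hrow), ← hner]
        rw [List.all_eq_not_any_not]
        simp only [Bool.not_not]
        congr 1
        funext row
        exact colbody_eq row ci
      have hcols : (List.range maxCols).filter (fun ci =>
            !(ner.all (fun row =>
              if ci < row.length then isEmptyCell_py (row.getD ci none) else true)))
          = (List.range M.length).filter (fun ci => M.getD ci false) := by
        have hAfalse : ∀ i, maxCols ≤ i →
            (!(ner.all (fun row =>
              if i < row.length then isEmptyCell_py (row.getD i none) else true))) = false := by
          intro i hi
          simp only [Bool.not_eq_false']
          rw [List.all_eq_true]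
          intro row hrow
          have hlen : row.length ≤ maxCols := by
            rw [hmax]
            exact le_foldl_max _ 0 _ (List.mem_map_of_mem hrow)
          have hni : ¬ i < row.length := by omega
          simp [hni]
        have hMfalse : ∀ i, M.length ≤ i → (M.getD i false) = false := by
          intro i hi; exact List.getD_eq_default _ _ hi
        calc (List.range maxCols).filter (fun ci =>
            !(ner.all (fun row =>
              if ci < row.length then isEmptyCell_py (row.getD ci none) else true)))
            = (List.range (Nat.max maxCols M.length)).filter (fun ci =>
                !(ner.all (fun row =>
                  if ci < row.length then isEmptyCell_py (row.getD ci none) else true))) := by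
              rw [filter_range_of_false _ maxCols (Nat.max maxCols M.length)
                (Nat.le_max_left _ _) hAfalse]
          _ = (List.range (Nat.max maxCols M.length)).filter (fun ci => M.getD ci false) := by
              apply List.filter_congr; intro ci _; exact hq ci
          _ = (List.range M.length).filter (fun ci => M.getD ci false) := by
              rw [filter_range_of_false _ M.length (Nat.max maxCols M.length)
                (Nat.le_max_right _ _) hMfalse]
      rw [hcols]
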